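-- pv_equiv track=rewrite | github.com/ManwaOkal/mathmentor | scripts/bulk_loader.py | _extract_learning_objectives
-- ===== SOURCE A (Python) =====
-- from typing import List, Dict, Any, Optional
--
-- def _extract_learning_objectives(content_lines: List[str]) -> List[str]:
--     """Extract learning objectives from content."""
--     objectives = []
--     in_objectives = False
--
--     for line in content_lines:
--         if 'learning objectives' in line.lower():
--             in_objectives = True
--             continue
--         if in_objectives and line.strip() and (line[0].isdigit() or line.strip().startswith('-')):
--             objectives.append(line.strip())
--         elif in_objectives and not line.strip():
--             break
--
--     return objectives
-- ===== SOURCE B (Python) =====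
-- def _extract_learning_objectives(content_lines):
--     """Extract learning objectives from content (declarative pipeline).
--
--     Staged passes: (1) the indices of header lines; (2) the tail after the
--     first header; (3) truncate that tail at its first blank line; (4) one
--     filter+map comprehension picks the objective lines.  A header line is
--     never blank (it contains letters), so truncating at the first blank of
--     the tail is exactly where A's loop breaks.
--     """
--     headers = [i for i, line in enumerate(content_lines)
--                if 'learning objectives' in line.lower()]
--     if not headers:
--         return []
--     tail = content_lines[headers[0] + 1:]
--     blanks = [j for j, line in enumerate(tail) if not line.strip()]
--     region = tail[:blanks[0]] if blanks else tail
--     return [line.strip() for line in region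
--             if 'learning objectives' not in line.lower()
--             and (line[0].isdigit() or line.strip().startswith('-'))]
-- ===== Notes on version B (the rewrite author's own statement) =====
-- stated objective: alternative
-- what changed: B replaces A's single stateful loop (in_objectives flag, continue/break) with a declarative staged pipeline: an index comprehension finds the header lines, a slice takes the tail after the first one, a second index comprehension locates the first blank line to truncate the tail, and one filter+map comprehension extracts the objective lines (correct because a header line always contains letters, hence is never the blank that stops A).
import Mathlib
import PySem

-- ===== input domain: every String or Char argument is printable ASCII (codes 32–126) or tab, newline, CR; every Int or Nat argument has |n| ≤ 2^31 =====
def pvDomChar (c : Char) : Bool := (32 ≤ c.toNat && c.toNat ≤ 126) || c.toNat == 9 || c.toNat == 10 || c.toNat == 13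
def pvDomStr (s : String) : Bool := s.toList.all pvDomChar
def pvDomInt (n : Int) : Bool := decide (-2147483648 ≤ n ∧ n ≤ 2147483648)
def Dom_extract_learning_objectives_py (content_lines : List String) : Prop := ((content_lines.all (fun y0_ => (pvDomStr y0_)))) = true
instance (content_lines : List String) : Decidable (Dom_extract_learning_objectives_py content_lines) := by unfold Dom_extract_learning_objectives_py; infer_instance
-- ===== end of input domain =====

-- B replaces A's stateful flagged loop by a declarative staged pipeline (index lists, slices, one comprehension); alternative decomposition, same cost.

-- shared condition helpers: the literal Python expressions occurring identically in A and in B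
-- 'learning objectives' in line.lower()
def pvHeader (line : String) : Bool :=
  PySem.Str.isIn "learning objectives" (PySem.Str.lower line)
-- not line.strip()  (the line is blank after stripping)
def pvBlank (line : String) : Bool :=
  PySem.Str.len (PySem.Str.strip line) == 0
-- line[0].isdigit() or line.strip().startswith('-')
def pvDigitDash (line : String) : Bool :=
  (PySem.Str.pyGet? line 0).elim false PySem.Chars.isdigit ||
    PySem.Str.startswith (PySem.Str.strip line) "-"

-- ===== PORT A =====

-- the for-loop of A, with the running `objectives` list and the `in_objectives` flag; returning = `break`
def pvA_loop : List String → List String → Bool → List String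
  | [], objectives, _ => objectives
  | line :: rest, objectives, inObj =>
    if pvHeader line then pvA_loop rest objectives true
    else if inObj && (!pvBlank line && pvDigitDash line) then
      pvA_loop rest (objectives ++ [PySem.Str.strip line]) inObj
    else if inObj && pvBlank line then objectives
    else pvA_loop rest objectives inObj

def extract_learning_objectives_py (content_lines : List String) : List String :=
  pvA_loop content_lines [] false

-- ===== PORT B =====
-- Source B stage by stage: the index comprehensions become filterMap over enumerate, the slices PySem.List.slice,
-- the final comprehension a filter + map.
def extract_learning_objectives_py_alt (content_lines : List String) : List String :=
  let headers := (PySem.List.enumerate content_lines).filterMap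
      (fun p => if pvHeader p.2 then some p.1 else none)
  match headers with
  | [] => []
  | i :: _ =>
    let tail := PySem.List.slice content_lines (some (i + 1)) none
    let blanks := (PySem.List.enumerate tail).filterMap
        (fun p => if pvBlank p.2 then some p.1 else none)
    let region := match blanks with
      | [] => tail
      | j :: _ => PySem.List.slice tail none (some j)
    (region.filter (fun line => !pvHeader line && pvDigitDash line)).map PySem.Str.strip

-- ===== PRECONDITION & SPEC =====
def Spec_extract_learning_objectives_py (content_lines : List String) (out : List String) : Prop := out = extract_learning_objectives_py_alt content_lines
instance (content_lines : List String) (out : List String) : Decidable (Spec_extract_learning_objectives_py content_lines out) := by unfold Spec_extract_learning_objectives_py; infer_instance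

-- ===== CLAIM (what is proved, stated in full; the proofs are below) =====
def Claim_equal_extract_learning_objectives_py : Prop := ∀ (content_lines : List String), Dom_extract_learning_objectives_py content_lines → Spec_extract_learning_objectives_py content_lines (extract_learning_objectives_py content_lines)

-- ===== LEMMAS AND PROOFS =====

-- index of the first line satisfying p (proof-only helper)
def pvFirstIdx (p : String → Bool) : List String → Option Nat
  | [] => none
  | l :: r => if p l then some 0 else (pvFirstIdx p r).map Nat.succ

-- the enumerate-filterMap comprehension is empty iff no element satisfies p
theorem pvEnumFM_none {p : String → Bool} {ls : List String} (s : Int)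
    (h : pvFirstIdx p ls = none) :
    (PySem.List.enumerate ls s).filterMap (fun q => if p q.2 = true then some q.1 else none) = [] := by
  induction ls generalizing s with
  | nil => simp [PySem.List.enumerate_nil]
  | cons l r ih =>
    simp only [pvFirstIdx] at h
    by_cases hp : p l
    · simp [hp] at h
    · simp [hp] at h
      simp [PySem.List.enumerate_cons, hp, ih _ h]

-- when the first p-line is at index k (from start s) the comprehension starts with s + k
theorem pvEnumFM_some {p : String → Bool} {ls : List String} {k : Nat} (s : Int)
    (h : pvFirstIdx p ls = some k) :
    ∃ t, (PySem.List.enumerate ls s).filterMap (fun q => if p q.2 = true then some q.1 else none)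
          = (s + (k : Int)) :: t := by
  induction ls generalizing s k with
  | nil => simp [pvFirstIdx] at h
  | cons l r ih =>
    simp only [pvFirstIdx] at h
    by_cases hp : p l
    · simp [hp] at h
      subst h
      refine ⟨(PySem.List.enumerate r (s + 1)).filterMap
        (fun q => if p q.2 = true then some q.1 else none), ?_⟩
      simp [PySem.List.enumerate_cons, hp]
    · simp [hp] at h
      obtain ⟨k', hk', rfl⟩ := h
      obtain ⟨t, ht⟩ := ih (s + 1) hk'
      refine ⟨t, ?_⟩
      simp [PySem.List.enumerate_cons, hp, ht]
      ring_nf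

-- before the header is found, A only searches; finding it at k, A proceeds on the k+1-tail with the flag set
theorem pvA_loop_nofind {ls : List String} (acc : List String)
    (h : pvFirstIdx pvHeader ls = none) : pvA_loop ls acc false = acc := by
  induction ls with
  | nil => rfl
  | cons l r ih =>
    simp only [pvFirstIdx] at h
    by_cases hp : pvHeader l
    · simp [hp] at h
    · simp [hp] at h
      simp [pvA_loop, hp, ih h]

theorem pvA_loop_find {ls : List String} {k : Nat} (acc : List String)
    (h : pvFirstIdx pvHeader ls = some k) :
    pvA_loop ls acc false = pvA_loop (ls.drop (k + 1)) acc true := by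
  induction ls generalizing k with
  | nil => simp [pvFirstIdx] at h
  | cons l r ih =>
    simp only [pvFirstIdx] at h
    by_cases hp : pvHeader l
    · simp [hp] at h
      subst h
      simp [pvA_loop, hp]
    · simp [hp] at h
      obtain ⟨k', hk', rfl⟩ := h
      simp [pvA_loop, hp, ih hk']

-- the first-blank truncation is exactly takeWhile nonblank
theorem pvTakeWhile_of_none {p : String → Bool} {ls : List String}
    (h : pvFirstIdx p ls = none) : ls.takeWhile (fun l => !p l) = ls := by
  induction ls with
  | nil => rfl
  | cons l r ih =>
    simp only [pvFirstIdx] at h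
    by_cases hp : p l
    · simp [hp] at h
    · simp [hp] at h
      simp [hp, ih h]

theorem pvTake_of_some {p : String → Bool} {ls : List String} {k : Nat}
    (h : pvFirstIdx p ls = some k) : ls.take k = ls.takeWhile (fun l => !p l) := by
  induction ls generalizing k with
  | nil => simp
  | cons l r ih =>
    simp only [pvFirstIdx] at h
    by_cases hp : p l
    · simp [hp] at h
      subst h
      simp [hp]
    · simp [hp] at h
      obtain ⟨k', hk', rfl⟩ := h
      simp [hp, ih hk']

-- a header line contains a letter, hence is not blank
theorem strip_nil_all_space {cs : List Char} (h : PySem.Chars.strip cs = []) :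
    ∀ c ∈ cs, PySem.Chars.isspace c = true := by
  unfold PySem.Chars.strip PySem.Chars.rstrip PySem.Chars.lstrip at h
  have h1 : ∀ c ∈ List.dropWhile PySem.Chars.isspace cs, PySem.Chars.isspace c = true := by
    intro c hc
    have h2 : List.dropWhile PySem.Chars.isspace
        ((List.dropWhile PySem.Chars.isspace cs).reverse) = [] := by simpa using h
    exact List.dropWhile_eq_nil_iff.mp h2 c (by simpa using hc)
  intro c hc
  rw [← List.takeWhile_append_dropWhile (p := PySem.Chars.isspace) (l := cs)] at hc
  rcases List.mem_append.mp hc with hc | hc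
  · exact List.mem_takeWhile_imp hc
  · exact h1 c hc

theorem pvHeader_nonblank {l : String} (h : pvHeader l = true) : pvBlank l = false := by
  by_contra hb
  simp only [pvBlank, beq_iff_eq, Bool.not_eq_false] at hb
  simp only [PySem.Str.len, PySem.Str.strip] at hb
  have hnil : PySem.Chars.strip l.toList = [] := by
    have hlen : (PySem.Chars.strip l.toList).length = 0 := by exact_mod_cast by simpa using hb
    exact List.length_eq_zero_iff.mp hlen
  have hall := strip_nil_all_space hnil
  have hinf : ("learning objectives".toList) <:+: (PySem.Str.lower l).toList :=
    (PySem.Str.isIn_iff_infix _ _).mp h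
  rw [PySem.Str.toList_lower] at hinf
  have hmem : 'l' ∈ PySem.Chars.lower l.toList := hinf.subset (by decide)
  simp only [PySem.Chars.lower, List.mem_map] at hmem
  obtain ⟨c, hc, hlc⟩ := hmem
  have hs := hall c hc
  unfold PySem.Chars.isspace at hs
  simp only [Bool.or_eq_true, Bool.and_eq_true, decide_eq_true_eq] at hs
  unfold PySem.Chars.lowerChar at hlc
  by_cases hu : PySem.Chars.isupper c = true
  · unfold PySem.Chars.isupper at hu
    simp only [Bool.and_eq_true, decide_eq_true_eq, Char.le_def] at hu
    have h65 : ('A').val.toNat = 65 := by decide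
    have h90 : ('Z').val.toNat = 90 := by decide
    have hcv : c.toNat = c.val.toNat := rfl
    obtain ⟨hu1, hu2⟩ := hu
    have hu1' := (UInt32.le_iff_toNat_le.mp hu1)
    have hu2' := (UInt32.le_iff_toNat_le.mp hu2)
    omega
  · rw [if_neg hu] at hlc
    subst hlc
    revert hs
    decide

-- after the header, A's loop is the filter-map of the nonblank prefix
theorem pvA_loop_true (lines : List String) (acc : List String) :
    pvA_loop lines acc true =
      acc ++ ((lines.takeWhile (fun l => !pvBlank l)).filter
        (fun line => !pvHeader line && pvDigitDash line)).map PySem.Str.strip := by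
  induction lines generalizing acc with
  | nil => simp [pvA_loop]
  | cons line rest ih =>
    simp only [pvA_loop]
    by_cases hh : pvHeader line
    · have hb := pvHeader_nonblank hh
      simp [hh, hb, ih]
    · by_cases hb : pvBlank line
      · simp [hh, hb]
      · by_cases hm : pvDigitDash line
        · simp [hh, hb, hm, ih]
        · simp [hh, hb, hm, ih]

-- ===== VERDICT (by name: the statement is the Claim_ definition above) =====
theorem extract_learning_objectives_py_spec : Claim_equal_extract_learning_objectives_py := by
  intro content_lines _
  unfold Spec_extract_learning_objectives_py extract_learning_objectives_py extract_learning_objectives_py_alt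
  cases hf : pvFirstIdx pvHeader content_lines with
  | none =>
    rw [pvEnumFM_none 0 hf]
    simp [pvA_loop_nofind _ hf]
  | some k =>
    obtain ⟨t, ht⟩ := pvEnumFM_some 0 hf
    rw [ht]
    simp only [zero_add]
    have htail : PySem.List.slice content_lines (some ((k : Int) + 1)) none
        = content_lines.drop (k + 1) := by
      have : ((k : Int) + 1) = ((k + 1 : Nat) : Int) := by push_cast; ring
      rw [this, PySem.List.slice_from_natCast]
    rw [pvA_loop_find _ hf]
    rw [pvA_loop_true]
    simp only [List.nil_append, htail]
    cases hb : pvFirstIdx pvBlank (content_lines.drop (k + 1)) with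
    | none =>
      rw [pvEnumFM_none 0 hb, pvTakeWhile_of_none hb]
    | some j =>
      obtain ⟨t', ht'⟩ := pvEnumFM_some 0 hb
      rw [ht']
      simp only [zero_add]
      rw [PySem.List.slice_to_natCast, pvTake_of_some hb]
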